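-- pv_equiv track=rewrite | github.com/statisticsnorway/ssb-befolkning-fagfunksjoner | src/ssb_befolkning_fagfunksjoner/demographics/order_country_codes.py | _sort_by_ranking_multiple
-- ===== SOURCE A (Python) =====
-- from collections.abc import Sequence
--
-- def _sort_by_ranking_multiple(
--     ranking: dict[str, int], codes: Sequence[str], dates: Sequence[str]
-- ) -> tuple[Sequence[str], Sequence[str]]:
--     """Sort country codes and dates by ranking priority."""
--     # Handle empty Sequences
--     if not codes:
--         return codes, dates
--
--     pairs = list(zip(codes, dates))
--     sorted_pairs = sorted(pairs, key=lambda x: ranking.get(x[0], float("inf")))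
--
--     # Unpack
--     sorted_codes = [code for code, _ in sorted_pairs]
--     sorted_dates = [date for _, date in sorted_pairs]
--
--     return sorted_codes, sorted_dates
-- ===== SOURCE B (Python) =====
-- def _sort_by_ranking_multiple(ranking, codes, dates):
--     """Sort country codes and dates by ranking priority (bucket by rank, sort distinct ranks)."""
--     if not codes:
--         return codes, dates
--
--     inf = float("inf")
--     buckets = {}
--     for code, date in zip(codes, dates):
--         buckets.setdefault(ranking.get(code, inf), []).append((code, date))
--
--     sorted_codes = []
--     sorted_dates = []
--     for rank in sorted(buckets):
--         for code, date in buckets[rank]: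
--             sorted_codes.append(code)
--             sorted_dates.append(date)
--
--     return sorted_codes, sorted_dates
-- ===== Notes on version B (the rewrite author's own statement) =====
-- stated objective: alternative
-- what changed: Instead of stably sorting all n (code, date) pairs by rank, B makes one bucketing pass grouping the pairs by rank (missing codes under float('inf')), sorts only the k distinct ranks, and concatenates the buckets in rank order.
import Mathlib
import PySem

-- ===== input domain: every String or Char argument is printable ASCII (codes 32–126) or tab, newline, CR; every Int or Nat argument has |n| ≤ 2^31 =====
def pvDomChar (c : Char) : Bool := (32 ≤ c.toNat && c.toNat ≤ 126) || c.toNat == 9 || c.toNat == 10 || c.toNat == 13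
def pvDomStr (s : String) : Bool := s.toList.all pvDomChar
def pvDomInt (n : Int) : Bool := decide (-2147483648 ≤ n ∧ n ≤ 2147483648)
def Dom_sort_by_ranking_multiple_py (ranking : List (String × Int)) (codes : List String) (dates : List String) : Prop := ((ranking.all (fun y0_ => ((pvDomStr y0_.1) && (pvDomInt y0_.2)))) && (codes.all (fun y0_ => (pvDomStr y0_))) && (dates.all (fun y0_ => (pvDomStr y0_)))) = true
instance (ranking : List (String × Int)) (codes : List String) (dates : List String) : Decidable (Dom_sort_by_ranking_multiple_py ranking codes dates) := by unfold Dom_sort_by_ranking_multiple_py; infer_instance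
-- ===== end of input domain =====

-- B replaces A's full stable sort of all (code, date) pairs with one bucketing pass keyed by rank plus
-- a sort of only the distinct ranks (objective: alternative decomposition; same observable result).

-- ===== PORT A =====

-- ranking.get(x[0], float("inf")) : the sort key.  float('inf') compares strictly above every int, so the
-- key is modelled exactly by the lexicographic pair: a found rank r ↦ (0, r), a missing code ↦ (1, 0);
-- all missing codes share one key (as they share inf), and it is strictly above every (0, r).
def pvRankKey (ranking : List (String × Int)) (c : String) : Int ×ₗ Int :=
  match PySem.Dict.get? (PySem.Dict.mk ranking) c with
  | none => toLex (1, 0)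
  | some r => toLex (0, r)

def sort_by_ranking_multiple_py (ranking : List (String × Int)) (codes : List String) (dates : List String) : List String × List String :=
  if codes = [] then (codes, dates)
  else
    let pairs := codes.zip dates
    let sorted_pairs := PySem.List.sorted pairs (fun x => pvRankKey ranking x.1) false
    (sorted_pairs.map (fun p => p.1), sorted_pairs.map (fun p => p.2))

-- ===== PORT B =====
def sort_by_ranking_multiple_py_alt (ranking : List (String × Int)) (codes : List String) (dates : List String) : List String × List String :=
  if codes = [] then (codes, dates)
  else
    -- buckets.setdefault(rank, []).append((code, date))  ==  buckets[rank] = buckets.get(rank, []) + [(code, date)]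
    let buckets : PySem.Dict (Int ×ₗ Int) (List (String × String)) :=
      (codes.zip dates).foldl
        (fun d p => d.modify (pvRankKey ranking p.1) [] (fun v => v ++ [p])) PySem.Dict.empty
    (PySem.List.sorted (PySem.Dict.keys buckets) (fun r => r) false).foldl
      (fun out r =>
        (PySem.Dict.getD buckets r []).foldl
          (fun out p => (out.1 ++ [p.1], out.2 ++ [p.2])) out)
      ([], [])

-- ===== PRECONDITION & SPEC =====
def Spec_sort_by_ranking_multiple_py (ranking : List (String × Int)) (codes : List String) (dates : List String) (out : List String × List String) : Prop := out = sort_by_ranking_multiple_py_alt ranking codes dates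
instance (ranking : List (String × Int)) (codes : List String) (dates : List String) (out : List String × List String) : Decidable (Spec_sort_by_ranking_multiple_py ranking codes dates out) := by unfold Spec_sort_by_ranking_multiple_py; infer_instance

-- ===== CLAIM (what is proved, stated in full; the proofs are below) =====
def Claim_equal_sort_by_ranking_multiple_py : Prop := ∀ (ranking : List (String × Int)) (codes : List String) (dates : List String), Dom_sort_by_ranking_multiple_py ranking codes dates → Spec_sort_by_ranking_multiple_py ranking codes dates (sort_by_ranking_multiple_py ranking codes dates)

-- ===== LEMMAS AND PROOFS =====

-- insertBy drops x exactly between a prefix it is not 'before' and a suffix it is 'before'.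
theorem pv_insertBy_split {α : Type} (before : α → α → Bool) (x : α) (p s : List α)
    (hp : ∀ y ∈ p, before x y = false) (hs : ∀ y ∈ s, before x y = true) :
    PySem.List.insertBy before x (p ++ s) = p ++ x :: s := by
  induction p with
  | nil =>
    cases s with
    | nil => rfl
    | cons y t => simp [PySem.List.insertBy, hs y (by simp)]
  | cons y t ih =>
    have hy : before x y = false := hp y (by simp)
    simp only [List.cons_append, PySem.List.insertBy, hy]
    simp only [Bool.false_eq_true, if_false, ih (fun z hz => hp z (by simp [hz]))]

-- A stable sort is the concatenation, over any strictly increasing list ks covering all keys,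
-- of the key-filtered groups of xs (in original order inside each group).
theorem pv_sorted_eq_flatMap_groups {α κ : Type} [LinearOrder κ] (xs : List α) (k : α → κ)
    (ks : List κ) (hp : ks.Pairwise (· < ·)) (hm : ∀ x ∈ xs, k x ∈ ks) :
    PySem.List.sorted xs k false = ks.flatMap (fun r => xs.filter (fun x => decide (k x = r))) := by
  induction xs using List.reverseRecOn with
  | nil =>
    simp [PySem.List.sorted_eq_foldl_insertBy]
  | append_singleton xs x ih =>
    have hx : k x ∈ ks := hm x (by simp)
    obtain ⟨p, s, rfl⟩ := List.append_of_mem hx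
    have hps := (List.pairwise_append.mp hp)
    have hpre : ∀ r ∈ p, r < k x := fun r hr => hps.2.2 r hr (k x) (by simp)
    have hsuf : ∀ r ∈ s, k x < r := (List.pairwise_cons.mp hps.2.1).1
    have hmx : ∀ y ∈ xs, k y ∈ p ++ k x :: s := fun y hy => hm y (by simp [hy])
    have step : PySem.List.sorted (xs ++ [x]) k false
        = PySem.List.insertBy (fun a b => decide (k a < k b)) x (PySem.List.sorted xs k false) := by
      simp [PySem.List.sorted_eq_foldl_insertBy, List.foldl_append]
    rw [step, ih hmx]
    -- split the flatMap at the k x group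
    have hsplit : (p ++ k x :: s).flatMap (fun r => xs.filter (fun y => decide (k y = r)))
        = (p.flatMap (fun r => xs.filter (fun y => decide (k y = r)))
            ++ xs.filter (fun y => decide (k y = k x)))
          ++ s.flatMap (fun r => xs.filter (fun y => decide (k y = r))) := by
      simp [List.flatMap_append]
    rw [hsplit]
    rw [pv_insertBy_split _ x _ _
      (by
        intro y hy
        simp only [List.mem_append, List.mem_filter, List.mem_flatMap] at hy
        rcases hy with ⟨r, hr, _, hkey⟩ | ⟨_, hkey⟩
        · have : k y = r := by simpa using hkey
          simp only [this, decide_eq_false_iff_not, not_lt]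
          exact le_of_lt (hpre r hr)
        · have : k y = k x := by simpa using hkey
          simp [this])
      (by
        intro y hy
        simp only [List.mem_flatMap, List.mem_filter] at hy
        obtain ⟨r, hr, _, hkey⟩ := hy
        have : k y = r := by simpa using hkey
        simp only [this, decide_eq_true_eq]
        exact hsuf r hr)]
    -- now match the groups of xs ++ [x]
    have hgroups : ∀ r : κ, (xs ++ [x]).filter (fun y => decide (k y = r))
        = xs.filter (fun y => decide (k y = r)) ++ if k x = r then [x] else [] := by
      intro r
      rw [List.filter_append]
      by_cases h : k x = r <;> simp [h]
    simp only [List.flatMap_append, List.flatMap_cons, hgroups]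
    have hpfl : p.flatMap (fun r => xs.filter (fun y => decide (k y = r)) ++ if k x = r then [x] else [])
        = p.flatMap (fun r => xs.filter (fun y => decide (k y = r))) := by
      apply List.flatMap_congr
      intro r hr
      have : ¬ (k x = r) := fun h => absurd (hpre r hr) (by simp [h])
      simp [this]
    have hsfl : s.flatMap (fun r => xs.filter (fun y => decide (k y = r)) ++ if k x = r then [x] else [])
        = s.flatMap (fun r => xs.filter (fun y => decide (k y = r))) := by
      apply List.flatMap_congr
      intro r hr
      have : ¬ (k x = r) := fun h => absurd (hsuf r hr) (by simp [h])
      simp [this]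
    rw [hpfl, hsfl]
    simp

-- B's bucket dictionary, characterised: the value stored at r is the r-keyed group of the pairs.
theorem pv_buckets_getD (ranking : List (String × Int)) (pairs : List (String × String)) (r : Int ×ₗ Int) :
    (pairs.foldl (fun d p => d.modify (pvRankKey ranking p.1) [] (fun v => v ++ [p])) PySem.Dict.empty).getD r []
      = pairs.filter (fun p => decide (pvRankKey ranking p.1 = r)) := by
  have h : pairs.foldl (fun d p => d.modify (pvRankKey ranking p.1) [] (fun v => v ++ [p])) PySem.Dict.empty
      = (pairs.map (fun p => (pvRankKey ranking p.1, p))).foldl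
          (fun d q => d.modify q.1 [] (fun v => v ++ [q.2])) PySem.Dict.empty := by
    rw [List.foldl_map]
  rw [h, PySem.Dict.getD_foldl_modify_append]
  rw [show PySem.Dict.getD PySem.Dict.empty r ([] : List (String × String)) = [] from rfl]
  rw [List.filter_map]
  simp only [Function.comp_def, Bool.beq_eq_decide_eq]
  simp [Function.comp_def]

-- and its keys are the distinct ranks, in first-appearance order.
theorem pv_buckets_keys (ranking : List (String × Int)) (pairs : List (String × String)) :
    (pairs.foldl (fun d p => d.modify (pvRankKey ranking p.1) [] (fun v => v ++ [p])) PySem.Dict.empty).keys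
      = PySem.Set.ofList (pairs.map (fun p => pvRankKey ranking p.1)) := by
  rw [PySem.Dict.keys_foldl_modify_key (f := fun _ p v => v ++ [p])]
  simp [PySem.Dict.keys_empty, PySem.Set.ofList, PySem.Set.update]

-- B's output loop is append-only: it flattens the groups and projects the two components.
theorem pv_foldl_out {κ β : Type} (ks : List κ) (G : κ → List (String × β)) (acc : List String × List β) :
    ks.foldl (fun out r => (G r).foldl (fun out p => (out.1 ++ [p.1], out.2 ++ [p.2])) out) acc
      = (acc.1 ++ ((ks.flatMap G).map (fun p => p.1)), acc.2 ++ ((ks.flatMap G).map (fun p => p.2))) := by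
  induction ks generalizing acc with
  | nil => simp
  | cons r t ih =>
    have hg : (G r).foldl (fun out p => (out.1 ++ [p.1], out.2 ++ [p.2])) acc
        = (acc.1 ++ (G r).map (fun p => p.1), acc.2 ++ (G r).map (fun p => p.2)) := by
      rw [PySem.List.foldl_prod_mk (f := fun o (p : String × β) => o ++ [p.1])
            (g := fun o (p : String × β) => o ++ [p.2]),
          PySem.List.foldl_append_singleton_eq_map, PySem.List.foldl_append_singleton_eq_map]
    rw [List.foldl_cons, hg, ih]
    simp

-- ===== VERDICT (by name: the statement is the Claim_ definition above) =====
theorem sort_by_ranking_multiple_py_spec : Claim_equal_sort_by_ranking_multiple_py := by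
  intro ranking codes dates _
  unfold Spec_sort_by_ranking_multiple_py
  unfold sort_by_ranking_multiple_py sort_by_ranking_multiple_py_alt
  by_cases hc : codes = []
  · simp [hc]
  · simp only [hc, if_false]
    set pairs := codes.zip dates with hpairs
    set k : String × String → Int ×ₗ Int := fun p => pvRankKey ranking p.1 with hk
    set buckets := pairs.foldl (fun d p => d.modify (pvRankKey ranking p.1) [] (fun v => v ++ [p])) PySem.Dict.empty with hb
    set ks := PySem.List.sorted (PySem.Dict.keys buckets) (fun r => r) false with hks
    have hkeys : PySem.Dict.keys buckets = PySem.Set.ofList (pairs.map (fun p => pvRankKey ranking p.1)) :=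
      pv_buckets_keys ranking pairs
    have hkp : ks.Pairwise (· < ·) := by
      rw [hks, hkeys]
      exact PySem.List.sorted_ofList_pairwise_lt _
    have hkm : ∀ p ∈ pairs, k p ∈ ks := by
      intro p hp
      rw [hks, PySem.List.mem_sorted, hkeys]
      have : k p ∈ pairs.map (fun p => pvRankKey ranking p.1) := List.mem_map_of_mem hp
      simpa [PySem.Set.mem_ofList] using this
    rw [pv_foldl_out]
    have hflat : ks.flatMap (fun r => PySem.Dict.getD buckets r [])
        = ks.flatMap (fun r => pairs.filter (fun p => decide (k p = r))) := by
      apply List.flatMap_congr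
      intro r _
      exact pv_buckets_getD ranking pairs r
    rw [hflat, ← pv_sorted_eq_flatMap_groups pairs k ks hkp hkm]
    simp
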